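-- pv_equiv track=rewrite | github.com/webpy/webpy | web/template.py | read_indented_block
-- ===== SOURCE A (Python) =====
-- def splitline(text):
--     r"""
--     Splits the given text at newline.
--
--         >>> splitline('foo\nbar')
--         ('foo\n', 'bar')
--         >>> splitline('foo')
--         ('foo', '')
--         >>> splitline('')
--         ('', '')
--     """
--     index = text.find("\n") + 1
--     if index:
--         return text[:index], text[index:]
--     else:
--         return text, ""
--
-- def read_indented_block(text, indent):
--     r"""Read a block of text. A block is what typically follows a for or it statement.
--     It can be in the same line as that of the statement or an indented block.
--
--         >>> read_indented_block = Parser().read_indented_block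
--         >>> read_indented_block('  a\n  b\nc', '  ')
--         ('a\nb\n', 'c')
--         >>> read_indented_block('  a\n    b\n  c\nd', '  ')
--         ('a\n  b\nc\n', 'd')
--         >>> read_indented_block('  a\n\n    b\nc', '  ')
--         ('a\n\n  b\n', 'c')
--     """
--     if indent == "":
--         return "", text
--
--     block = ""
--     while text:
--         line, text2 = splitline(text)
--         if line.strip() == "":
--             block += "\n"
--         elif line.startswith(indent):
--             block += line[len(indent) :]
--         else:
--             break
--         text = text2
--     return block, text
-- ===== SOURCE B (Python) =====
-- def read_indented_block(text, indent):
--     if indent == "":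
--         return "", text
--     # Pass 0: reconstruct the physical line list (each line keeps its '\n';
--     # a final piece without newline is a line only if non-empty).
--     parts = text.split("\n")
--     lines = [p + "\n" for p in parts[:-1]]
--     if parts[-1] != "":
--         lines.append(parts[-1])
--     # Pass 1: find the index of the first line that ends the block.
--     i = 0
--     for line in lines:
--         if line.strip() != "" and not line.startswith(indent):
--             break
--         i += 1
--     # Pass 2: transform the block lines, keep the rest verbatim.
--     n = len(indent)
--     block = "".join("\n" if line.strip() == "" else line[n:] for line in lines[:i])
--     return block, "".join(lines[i:])
-- ===== Notes on version B (the rewrite author's own statement) =====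
-- stated objective: alternative
-- what changed: A consumes the text with a while-loop that repeatedly calls splitline and accumulates the block string as it goes; B instead splits the whole text into its physical line list once, scans that list for the break index in one pass, and rebuilds block and remainder with two joins.
import Mathlib
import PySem

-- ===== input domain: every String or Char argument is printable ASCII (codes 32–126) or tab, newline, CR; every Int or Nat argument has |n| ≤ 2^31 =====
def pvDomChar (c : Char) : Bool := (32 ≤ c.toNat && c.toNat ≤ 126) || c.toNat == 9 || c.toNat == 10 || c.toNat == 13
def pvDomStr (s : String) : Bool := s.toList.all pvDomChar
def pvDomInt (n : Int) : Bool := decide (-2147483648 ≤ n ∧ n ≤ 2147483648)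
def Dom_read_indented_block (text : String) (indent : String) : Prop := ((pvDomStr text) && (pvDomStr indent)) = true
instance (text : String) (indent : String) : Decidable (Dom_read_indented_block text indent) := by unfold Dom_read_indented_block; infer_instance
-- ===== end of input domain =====

-- B re-splits the text into physical lines in one pass, locates the break index, and
-- rebuilds block/remainder with two joins; same return value as A's splitline while-loop.

-- ===== PORT A =====
-- splitline(text): split at the first newline (inclusive)
def splitlineA (cs : List Char) : List Char × List Char :=
  -- index = text.find("\n") + 1
  if PySem.Chars.find cs ['\n'] + 1 ≠ 0 then
    (PySem.List.slice cs none (some (PySem.Chars.find cs ['\n'] + 1)),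
     PySem.List.slice cs (some (PySem.Chars.find cs ['\n'] + 1)) none)
  else (cs, [])

-- termination helper for A's while loop (the port cites it in decreasing_by)
theorem splitlineA_snd_lt (cs : List Char) (h : cs ≠ []) :
    (splitlineA cs).2.length < cs.length := by
  have h0 : (-1:Int) ≤ PySem.Chars.find cs ['\n'] := PySem.Chars.neg_one_le_find cs ['\n']
  have hlen : 0 < cs.length := List.length_pos_iff.mpr h
  unfold splitlineA
  split
  next hi =>
    rw [PySem.List.slice_from cs (by omega)]
    simp only [List.length_drop]
    omega
  next hi => simpa using hlen

-- the while loop of read_indented_block, state = (block, text)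
def loopA (ind : List Char) (block : List Char) (cs : List Char) : List Char × List Char :=
  if _hcs : cs = [] then (block, cs)
  else
    let p := splitlineA cs
    if PySem.Chars.strip p.1 = [] then
      loopA ind (block ++ ['\n']) p.2
    else if PySem.Chars.startswith p.1 ind then
      loopA ind (block ++ PySem.List.slice p.1 (some (ind.length : Int))) p.2
    else (block, cs)
termination_by cs.length
decreasing_by all_goals exact splitlineA_snd_lt cs _hcs

def read_indented_block (text : String) (indent : String) : String × String :=
  if indent = "" then ("", text)
  else
    let r := loopA indent.toList [] text.toList
    (String.ofList r.1, String.ofList r.2)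

-- ===== PORT B =====
-- lines = [p + "\n" for p in parts[:-1]]  (+ the last piece, if non-empty)
def linesB (cs : List Char) : List (List Char) :=
  let parts := PySem.Chars.splitOn cs ['\n']
  let lastP := (PySem.List.pyGet? parts (-1)).getD []   -- parts[-1]; split never returns []
  (PySem.List.slice parts none (some (-1))).map (fun p => p ++ ['\n']) ++
    (if lastP ≠ [] then [lastP] else [])

-- pass 1: index of the first line that ends the block ('for line in lines: … break')
def countB (ind : List Char) : List (List Char) → Nat
  | [] => 0
  | line :: rest =>
    if ¬ PySem.Chars.strip line = [] ∧ ¬ PySem.Chars.startswith line ind = true then 0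
    else countB ind rest + 1

-- per-line transform of pass 2
def transB (ind line : List Char) : List Char :=
  if PySem.Chars.strip line = [] then ['\n']
  else PySem.List.slice line (some (ind.length : Int))

def read_indented_block_alt (text : String) (indent : String) : String × String :=
  if indent = "" then ("", text)
  else
    let lines := linesB text.toList
    let i := countB indent.toList lines
    (String.ofList (PySem.Chars.join [] ((PySem.List.slice lines none (some (i : Int))).map (transB indent.toList))),
     String.ofList (PySem.Chars.join [] (PySem.List.slice lines (some (i : Int)))))

-- ===== PRECONDITION & SPEC =====
def Spec_read_indented_block (text : String) (indent : String) (out : String × String) : Prop := out = read_indented_block_alt text indent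
instance (text : String) (indent : String) (out : String × String) : Decidable (Spec_read_indented_block text indent out) := by unfold Spec_read_indented_block; infer_instance

-- ===== CLAIM (what is proved, stated in full; the proofs are below) =====
def Claim_equal_read_indented_block : Prop := ∀ (text : String) (indent : String), Dom_read_indented_block text indent → Spec_read_indented_block text indent (read_indented_block text indent)

-- ===== LEMMAS AND PROOFS =====

-- reference splitter: split at every '\n' (accumulating the current piece in `pre`)
def mySplit (pre : List Char) : List Char → List (List Char)
  | [] => [pre]
  | c :: rest => if c = '\n' then pre :: mySplit [] rest else mySplit (pre ++ [c]) rest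

theorem splitOn_go_eq (fuel : Nat) : ∀ (l cur : List Char) (acc : List (List Char)),
    l.length < fuel →
    PySem.Chars.splitOn.go ['\n'] fuel l cur acc = acc.reverse ++ mySplit cur.reverse l := by
  induction fuel with
  | zero => intro l cur acc h; omega
  | succ n ih =>
    intro l cur acc h
    cases l with
    | nil => rw [PySem.Chars.splitOn.go.eq_def]; simp [mySplit]
    | cons c rest =>
      rw [PySem.Chars.splitOn.go.eq_def]
      simp only [List.isPrefixOf, List.length_cons] at *
      by_cases hc : c = '\n'
      · simp only [hc, BEq.rfl, Bool.true_and]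
        rw [if_pos (by simp)]
        rw [ih _ _ _ (by simpa using h)]
        simp [mySplit]
      · rw [if_neg (by simp [((beq_iff_eq).ne.mpr (Ne.symm hc))])]
        rw [ih _ _ _ (by omega)]
        simp [mySplit, hc]

theorem splitOn_nl (cs : List Char) :
    PySem.Chars.splitOn cs ['\n'] = mySplit [] cs := by
  have := splitOn_go_eq (cs.length + 1) cs [] [] (by omega)
  simpa [PySem.Chars.splitOn] using this

theorem mySplit_ne_nil (l : List Char) : ∀ pre, mySplit pre l ≠ [] := by
  induction l with
  | nil => intro pre; simp [mySplit]
  | cons c rest ih =>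
    intro pre
    by_cases hc : c = '\n' <;> simp [mySplit, hc, ih]

theorem mySplit_no_nl (l : List Char) : ∀ pre, '\n' ∉ l → mySplit pre l = [pre ++ l] := by
  induction l with
  | nil => intro pre _; simp [mySplit]
  | cons c rest ih =>
    intro pre h
    have hc : c ≠ '\n' := fun hc => h (by simp [hc])
    rw [mySplit, if_neg hc, ih _ (fun hm => h (by simp [hm]))]
    simp

theorem mySplit_first (a : List Char) : ∀ pre (b : List Char), '\n' ∉ a →
    mySplit pre (a ++ '\n' :: b) = (pre ++ a) :: mySplit [] b := by
  induction a with
  | nil => intro pre b _; simp [mySplit]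
  | cons c rest ih =>
    intro pre b h
    have hc : c ≠ '\n' := fun hc => h (by simp [hc])
    rw [List.cons_append, mySplit, if_neg hc, ih _ _ (fun hm => h (by simp [hm]))]
    simp

-- every string is either newline-free or splits at its first newline
theorem nl_decomp (cs : List Char) :
    '\n' ∉ cs ∨ ∃ a b, cs = a ++ '\n' :: b ∧ '\n' ∉ a := by
  induction cs with
  | nil => left; simp
  | cons c rest ih =>
    by_cases hc : c = '\n'
    · right; exact ⟨[], rest, by simp [hc], by simp⟩
    · rcases ih with h | ⟨a, b, hab, ha⟩
      · left
        intro hm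
        rcases List.mem_cons.mp hm with he | hm'
        · exact hc he.symm
        · exact h hm'
      · right
        refine ⟨c :: a, b, by simp [hab], ?_⟩
        intro hm
        rcases List.mem_cons.mp hm with he | hm'
        · exact hc he.symm
        · exact ha hm' 

-- ---- splitlineA on both shapes ----

theorem splitlineA_no_nl (cs : List Char) (h : '\n' ∉ cs) : splitlineA cs = (cs, []) := by
  have hfind : PySem.Chars.find cs ['\n'] = -1 :=
    (PySem.Chars.find_eq_neg_one_iff cs ['\n']).mpr (by
      rw [List.singleton_infix_iff]; exact h)
  simp [splitlineA, hfind]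

theorem splitlineA_first (a b : List Char) (h : '\n' ∉ a) :
    splitlineA (a ++ '\n' :: b) = (a ++ ['\n'], b) := by
  have hinf : ['\n'] <:+: (a ++ '\n' :: b) := by
    rw [List.singleton_infix_iff]; simp
  have h0 : 0 ≤ PySem.Chars.find (a ++ '\n' :: b) ['\n'] :=
    (PySem.Chars.find_nonneg_iff _ _).mpr hinf
  obtain ⟨hpre, hmin⟩ := PySem.Chars.find_spec h0
  set t := (PySem.Chars.find (a ++ '\n' :: b) ['\n']).toNat with ht
  have hteq : t = a.length := by
    by_contra hne
    rcases Nat.lt_or_ge t a.length with hlt | hge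
    · -- the found newline would be inside a
      obtain ⟨u, hu⟩ := hpre
      have : (a ++ '\n' :: b).drop t = a.drop t ++ '\n' :: b := List.drop_append_of_le_length (by omega)
      rw [this] at hu
      have hmem : '\n' ∈ a := by
        have h1 : a.drop t ≠ [] := by
          intro hnil
          have := congrArg List.length hnil
          simp at this; omega
        cases hd : a.drop t with
        | nil => exact absurd hd h1
        | cons x xs =>
          rw [hd] at hu
          have hx : x = '\n' := by
            have := congrArg (fun l => l.head?) hu
            simpa using this.symm
          have : x ∈ a := List.mem_of_mem_drop (hd ▸ List.mem_cons_self)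
          rwa [hx] at this
      exact h hmem
    · have hlt : a.length < t := by omega
      exact hmin a.length hlt (by simp)
  have hfind : PySem.Chars.find (a ++ '\n' :: b) ['\n'] = (a.length : Int) := by omega
  have hlen1 : ((a.length : Int) + 1).toNat = a.length + 1 := by omega
  rw [splitlineA, if_pos (by rw [hfind]; omega)]
  rw [PySem.List.slice_to _ (by rw [hfind]; omega), PySem.List.slice_from _ (by rw [hfind]; omega)]
  rw [hfind, hlen1]
  rw [Prod.mk.injEq]
  refine ⟨?_, ?_⟩
  · simp [List.take_append]
  · simp [List.drop_append]

-- ---- the lines list of B on both shapes ----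

theorem join_nil_flatten (p : List (List Char)) : PySem.Chars.join [] p = p.flatten := by
  have : (List.intersperse ([] : List Char) p).flatten = p.flatten := by
    induction p with
    | nil => rfl
    | cons x t ih => cases t <;> simp_all [List.intersperse]
  simpa [PySem.Chars.join, List.intercalate] using this

theorem slice_neg_one (xs : List (List Char)) :
    PySem.List.slice xs none (some (-1)) = xs.dropLast := by
  cases xs with
  | nil => rfl
  | cons x t =>
    simp [PySem.List.slice, PySem.List.clampIdx, List.dropLast_eq_take]
    rw [if_neg (by omega : ¬ ((t.length : Int) < 0))]
    omega

theorem pyGet_neg_one (xs : List (List Char)) (h : xs ≠ []) :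
    PySem.List.pyGet? xs (-1) = xs.getLast? := by
  have hlen : 0 < xs.length := List.length_pos_iff.mpr h
  simp only [PySem.List.pyGet?, PySem.List.pyIdx?]
  rw [if_neg (by omega), if_pos (by omega)]
  simp [List.getLast?_eq_getElem?]

theorem linesB_nil : linesB [] = [] := by
  simp [linesB, splitOn_nl, mySplit, PySem.List.pyGet?, PySem.List.pyIdx?, slice_neg_one]

theorem linesB_no_nl (cs : List Char) (h : '\n' ∉ cs) (hne : cs ≠ []) : linesB cs = [cs] := by
  rw [linesB]
  rw [splitOn_nl, mySplit_no_nl cs [] h]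
  simp [slice_neg_one, PySem.List.pyGet?, PySem.List.pyIdx?, hne]

theorem linesB_cons (a b : List Char) (h : '\n' ∉ a) :
    linesB (a ++ '\n' :: b) = (a ++ ['\n']) :: linesB b := by
  rw [linesB, linesB]
  rw [splitOn_nl, splitOn_nl, mySplit_first a [] b h]
  have hne : mySplit [] b ≠ [] := mySplit_ne_nil b []
  rw [slice_neg_one, slice_neg_one, List.dropLast_cons_of_ne_nil hne]
  rw [pyGet_neg_one _ (by simp), pyGet_neg_one _ hne]
  have : (([] ++ a) :: mySplit [] b).getLast? = (mySplit [] b).getLast? := by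
    cases hm : mySplit [] b with
    | nil => exact absurd hm hne
    | cons y t => simp [List.getLast?_cons_cons]
  rw [this]
  simp

theorem join_linesB (cs : List Char) : PySem.Chars.join [] (linesB cs) = cs := by
  generalize hn : cs.length = n
  induction n using Nat.strong_induction_on generalizing cs with
  | _ n ih =>
  subst hn
  by_cases hnil : cs = []
  · simp [hnil, linesB_nil]
  · rcases nl_decomp cs with h | ⟨a, b, hab, ha⟩
    · simp [linesB_no_nl cs h hnil]
    · subst hab
      rw [linesB_cons a b ha, join_nil_flatten] at *
      have hb := ih b.length (by simp; omega) b rfl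
      rw [join_nil_flatten] at hb
      simp [hb]

-- ---- B's core on char lists, and its recurrence ----

def coreB (ind cs : List Char) : List Char × List Char :=
  let lines := linesB cs
  let i := countB ind lines
  (PySem.Chars.join [] ((PySem.List.slice lines none (some (i : Int))).map (transB ind)),
   PySem.Chars.join [] (PySem.List.slice lines (some (i : Int))))

theorem alt_eq (text indent : String) (h : ¬ indent = "") :
    read_indented_block_alt text indent =
      (String.ofList (coreB indent.toList text.toList).1,
       String.ofList (coreB indent.toList text.toList).2) := by
  simp [read_indented_block_alt, coreB, h]

theorem slice_take (lines : List (List Char)) (i : Nat) :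
    PySem.List.slice lines none (some (i : Int)) = lines.take i := by
  rw [PySem.List.slice_to _ (by omega)]; simp

theorem slice_drop (lines : List (List Char)) (i : Nat) :
    PySem.List.slice lines (some (i : Int)) none = lines.drop i := by
  rw [PySem.List.slice_from _ (by omega)]; simp

theorem coreB_pieces (ind cs : List Char) :
    coreB ind cs = ((((linesB cs).take (countB ind (linesB cs))).map (transB ind)).flatten,
                    ((linesB cs).drop (countB ind (linesB cs))).flatten) := by
  rw [coreB]
  rw [slice_take, slice_drop, join_nil_flatten, join_nil_flatten]

-- ---- the accumulator of A's loop factors out ----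

theorem loopA_acc (ind : List Char) (cs : List Char) : ∀ (acc : List Char),
    loopA ind acc cs = (acc ++ (loopA ind [] cs).1, (loopA ind [] cs).2) := by
  generalize hn : cs.length = n
  induction n using Nat.strong_induction_on generalizing cs with
  | _ n ih =>
  subst hn
  intro acc
  by_cases hnil : cs = []
  · rw [loopA, loopA]; simp [hnil]
  · have hlt := splitlineA_snd_lt cs hnil
    rw [loopA, loopA, dif_neg hnil, dif_neg hnil]
    by_cases h1 : PySem.Chars.strip (splitlineA cs).1 = []
    · simp only [h1, if_pos]
      rw [ih _ hlt _ rfl (acc ++ ['\n']), ih _ hlt _ rfl ([] ++ ['\n'])]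
      simp
    · rw [if_neg h1, if_neg h1]
      by_cases h2 : PySem.Chars.startswith (splitlineA cs).1 ind = true
      · rw [if_pos h2, if_pos h2]
        rw [ih _ hlt _ rfl, ih _ hlt _ rfl ([] ++ _)]
        simp
      · simp [h2]

-- ---- main induction: A's loop equals B's three passes ----

theorem main_eq (ind : List Char) (cs : List Char) :
    loopA ind [] cs = coreB ind cs := by
  generalize hn : cs.length = n
  induction n using Nat.strong_induction_on generalizing cs with
  | _ n ih =>
  subst hn
  by_cases hnil : cs = []
  · subst hnil
    rw [loopA, coreB_pieces]
    simp [linesB_nil, countB]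
  · rcases nl_decomp cs with h | ⟨a, b, hab, ha⟩
    · -- single line without newline
      have hlines : linesB cs = [cs] := linesB_no_nl cs h hnil
      rw [loopA, dif_neg hnil]
      simp only [splitlineA_no_nl cs h]
      rw [coreB_pieces, hlines]
      by_cases h1 : PySem.Chars.strip cs = []
      · rw [if_pos h1, loopA]
        simp [countB, transB, h1]
      · rw [if_neg h1]
        by_cases h2 : PySem.Chars.startswith cs ind = true
        · rw [if_pos h2, loopA]
          simp [countB, transB, h1, h2]
        · rw [if_neg h2]
          simp [countB, h1, h2]
    · subst hab
      have hb : loopA ind [] b = coreB ind b := ih b.length (by simp; omega) b rfl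
      have hlines := linesB_cons a b ha
      rw [loopA, dif_neg hnil]
      simp only [splitlineA_first a b ha]
      rw [coreB_pieces, hlines]
      rw [coreB_pieces] at hb
      by_cases h1 : PySem.Chars.strip (a ++ ['\n']) = []
      · rw [if_pos h1]
        rw [loopA_acc, hb]
        simp [countB, transB, h1]
      · rw [if_neg h1]
        by_cases h2 : PySem.Chars.startswith (a ++ ['\n']) ind = true
        · rw [if_pos h2]
          rw [loopA_acc, hb]
          simp [countB, transB, h1, h2]
        · rw [if_neg h2]
          have hjoin : ((a ++ ['\n']) :: linesB b).flatten = a ++ '\n' :: b := by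
            have := join_linesB b
            rw [join_nil_flatten] at this
            simp [this]
          simp [countB, h1, h2, hjoin]

-- ===== VERDICT (by name: the statement is the Claim_ definition above) =====
theorem read_indented_block_spec : Claim_equal_read_indented_block := by
  intro text indent _
  unfold Spec_read_indented_block
  by_cases hind : indent = ""
  · simp [read_indented_block, read_indented_block_alt, hind]
  · rw [alt_eq text indent hind]
    rw [read_indented_block, if_neg hind]
    rw [main_eq]
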